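-- pv_equiv track=rewrite | github.com/andstor/agentic-security-patch-classification-replication-package | baselines/PatchFinder/Phase-1/lexical_similarity.py | format_git_show_minimal
-- ===== SOURCE A (Python) =====
-- def format_git_show_minimal(git_show_string):
--     """
--     Robustly extracts diff content starting from the first '@@' line for each file, including the 'diff --git' line.
--
--     Args:
--         git_show_string: The git show diff string with potentially multiple file diffs.
--
--     Returns:
--         The extracted diff content, or an empty string if no diff is found.
--     """
--     lines = git_show_string.splitlines()
--     result_diffs = []
--     current_diff = []
--     at_at_found = False
--
--     for line in lines:
--         if line.startswith("diff --git"):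
--             if current_diff:  # Store the previous diff if any
--                 result_diffs.append("\n".join(current_diff))
--             current_diff = [line]  # Start a new diff
--             at_at_found = False
--         elif current_diff:
--             if line.startswith("@@"):
--                 at_at_found = True
--                 current_diff.append(line)
--             elif at_at_found:
--                 current_diff.append(line)
--
--     if current_diff:  # Store the last diff
--         result_diffs.append("\n".join(current_diff))
--
--     return "\n".join(result_diffs).strip()
-- ===== SOURCE B (Python) =====
-- def format_git_show_minimal(git_show_string):
--     """
--     Two-phase re-implementation: first partition the lines into groups, each
--     starting at a 'diff --git' header (lines before the first header are
--     dropped); then render each group as its header line plus everything from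
--     the group's first '@@' line (or just the header if the group has none).
--     """
--     lines = git_show_string.splitlines()
--     groups = []
--     for line in lines:
--         if line.startswith("diff --git"):
--             groups.append([line])
--         elif groups:
--             groups[-1].append(line)
--     pieces = []
--     for g in groups:
--         cut = next((j for j, l in enumerate(g) if l.startswith("@@")), None)
--         pieces.append(g[0] if cut is None else "\n".join([g[0]] + g[cut:]))
--     return "\n".join(pieces).strip()
-- ===== Notes on version B (the rewrite author's own statement) =====
-- stated objective: alternative
-- what changed: Replaces A's single-pass state machine with its at_at_found flag by a two-phase decomposition: first partition the lines into 'diff --git'-headed groups, then render each group as its header plus the slice from its first '@@' line.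
import Mathlib
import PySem

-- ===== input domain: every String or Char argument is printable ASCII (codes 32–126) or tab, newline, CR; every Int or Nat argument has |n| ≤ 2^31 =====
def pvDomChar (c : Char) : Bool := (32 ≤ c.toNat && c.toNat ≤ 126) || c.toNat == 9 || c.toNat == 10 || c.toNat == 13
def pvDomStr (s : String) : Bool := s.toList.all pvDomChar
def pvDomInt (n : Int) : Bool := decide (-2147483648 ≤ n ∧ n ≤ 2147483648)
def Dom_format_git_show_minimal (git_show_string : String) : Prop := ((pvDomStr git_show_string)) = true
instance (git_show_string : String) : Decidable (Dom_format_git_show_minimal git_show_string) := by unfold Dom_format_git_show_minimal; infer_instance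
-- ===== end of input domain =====

-- B replaces A's one-pass flag-driven state machine by a two-phase decomposition
-- (partition lines into header-led groups, then slice each group from its first '@@');
-- objective: alternative decomposition, same cost.

-- ===== PORT A =====
-- one fold step = one iteration of A's for-loop over (result_diffs, current_diff, at_at_found)
def pvAStep (st : List String × List String × Bool) (line : String) :
    List String × List String × Bool :=
  let res := st.1; let cur := st.2.1; let flag := st.2.2
  if PySem.Str.startswith line "diff --git" then
    (if cur ≠ [] then res ++ [PySem.Str.join "\n" cur] else res, [line], false)
  else if cur ≠ [] then
    if PySem.Str.startswith line "@@" then (res, cur ++ [line], true)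
    else if flag then (res, cur ++ [line], flag)
    else (res, cur, flag)
  else (res, cur, flag)

def format_git_show_minimal (git_show_string : String) : String :=
  let lines := PySem.Str.splitlines git_show_string
  let st := lines.foldl pvAStep ([], [], false)
  let res := if st.2.1 ≠ [] then st.1 ++ [PySem.Str.join "\n" st.2.1] else st.1
  PySem.Str.strip (PySem.Str.join "\n" res)

-- ===== PORT B =====
-- phase 1 of Source B: partition into groups ('groups.append([line])' / 'groups[-1].append(line)')
def pvBGroupStep (gs : List (List String)) (line : String) : List (List String) :=
  if PySem.Str.startswith line "diff --git" then gs ++ [[line]]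
  else if gs ≠ [] then gs.dropLast ++ [gs.getLastD [] ++ [line]]
  else gs

-- phase 2 of Source B: render one group (g[0] is total here since every group is nonempty,
-- headD "" is its faithful rendering; 'cut' is Source B's first index with startswith "@@")
def pvBRender (g : List String) : String :=
  match List.findIdx? (fun l => PySem.Str.startswith l "@@") g with
  | none => g.headD ""
  | some j => PySem.Str.join "\n" (g.headD "" :: g.drop j)

def format_git_show_minimal_alt (git_show_string : String) : String :=
  let lines := PySem.Str.splitlines git_show_string
  let gs := lines.foldl pvBGroupStep []
  PySem.Str.strip (PySem.Str.join "\n" (gs.map pvBRender))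

-- ===== PRECONDITION & SPEC =====
def Spec_format_git_show_minimal (git_show_string : String) (out : String) : Prop := out = format_git_show_minimal_alt git_show_string
instance (git_show_string : String) (out : String) : Decidable (Spec_format_git_show_minimal git_show_string out) := by unfold Spec_format_git_show_minimal; infer_instance

-- ===== CLAIM (what is proved, stated in full; the proofs are below) =====
def Claim_equal_format_git_show_minimal : Prop := ∀ (git_show_string : String), Dom_format_git_show_minimal git_show_string → Spec_format_git_show_minimal git_show_string (format_git_show_minimal git_show_string)

-- ===== LEMMAS AND PROOFS =====

-- the suffix of ls starting at its first "@@" line ([] if none)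
def pvSinceAt (ls : List String) : List String :=
  match ls with
  | [] => []
  | l :: rest => if PySem.Str.startswith l "@@" then l :: rest else pvSinceAt rest

def pvRenderCur (g : List String) : List String := g.headD "" :: pvSinceAt g.tail

def pvF (g : List String) : String := PySem.Str.join "\n" (pvRenderCur g)

-- invariant tying A's loop state to B's group list
def pvInv (gs : List (List String)) (st : List String × List String × Bool) : Prop :=
  (∀ g ∈ gs, ∃ h t, g = h :: t ∧ PySem.Str.startswith h "diff --git" = true) ∧
  st.1 = gs.dropLast.map pvF ∧
  st.2.1 = ((gs.getLast?).map pvRenderCur).getD [] ∧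
  st.2.2 = !(((gs.getLast?).map (fun g => pvSinceAt g.tail)).getD []).isEmpty

lemma pv_hd_not_at (l : String) (h : PySem.Str.startswith l "diff --git" = true) :
    PySem.Str.startswith l "@@" = false := by
  simp only [PySem.Str.startswith_eq] at *
  rw [PySem.Chars.startswith_iff] at h
  by_contra hc
  simp only [Bool.not_eq_false] at hc
  rw [PySem.Chars.startswith_iff] at hc
  obtain ⟨r1, h1⟩ := h; obtain ⟨r2, h2⟩ := hc
  have := h1.trans h2.symm
  simp at this

lemma pvSinceAt_append_singleton (t : List String) (l : String) :
    pvSinceAt (t ++ [l]) =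
      if (pvSinceAt t).isEmpty then
        (if PySem.Str.startswith l "@@" then [l] else [])
      else pvSinceAt t ++ [l] := by
  induction t with
  | nil => simp [pvSinceAt]
  | cons x r ih =>
      simp only [List.cons_append, pvSinceAt]
      by_cases hx : PySem.Chars.startswith x.toList ['@', '@'] = true
      · simp [hx]
      · simp [hx, ih]

lemma pvSinceAt_findIdx? (ls : List String) :
    (match List.findIdx? (fun l => PySem.Str.startswith l "@@") ls with
     | none => pvSinceAt ls = []
     | some j => pvSinceAt ls = ls.drop j) := by
  induction ls with
  | nil => simp [pvSinceAt]
  | cons x r ih =>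
      simp only [PySem.Str.startswith_eq,
        show ("@@".toList) = ['@', '@'] from rfl] at ih ⊢
      by_cases hx : PySem.Chars.startswith x.toList ['@', '@'] = true
      · simp [List.findIdx?_cons, hx, pvSinceAt]
      · simp only [List.findIdx?_cons, pvSinceAt, hx, cond_false, if_neg hx]
        cases hfi : List.findIdx? (fun l => PySem.Chars.startswith l.toList ['@', '@']) r with
        | none => rw [hfi] at ih; simp [hx, ih]
        | some j => rw [hfi] at ih; simp [hx, ih]

lemma pv_join_one (sep x : String) : PySem.Str.join sep [x] = x := by
  have h : (PySem.Str.join sep [x]).toList = x.toList := by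
    rw [PySem.Str.toList_join]
    simp [PySem.Chars.join_singleton sep.toList x.toList]
  exact String.toList_inj.1 h

-- for a header-led group, B's per-group rendering equals the join of A's current_diff
lemma pvBRender_eq_f (h : String) (t : List String)
    (hh : PySem.Str.startswith h "diff --git" = true) :
    pvBRender (h :: t) = pvF (h :: t) := by
  have hna := pv_hd_not_at h hh
  have hfi := pvSinceAt_findIdx? t
  unfold pvBRender pvF pvRenderCur
  simp only [List.findIdx?_cons, hna]
  cases hfit : List.findIdx? (fun l => PySem.Str.startswith l "@@") t with
  | none =>
      rw [hfit] at hfi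
      simp only [Option.map_none]
      simp only [List.headD, List.tail, hfi]
      exact (pv_join_one "\n" h).symm
  | some j =>
      rw [hfit] at hfi
      simp [List.headD, List.tail, hfi]

lemma pvInv_step (gs : List (List String)) (res cur : List String) (flag : Bool)
    (line : String) (hinv : pvInv gs (res, cur, flag)) :
    pvInv (pvBGroupStep gs line) (pvAStep (res, cur, flag) line) := by
  obtain ⟨hgood, hres, hcur, hflag⟩ := hinv
  simp only at hres hcur hflag
  by_cases hl : PySem.Str.startswith line "diff --git" = true
  all_goals rw [PySem.Str.startswith_eq,
    show ("diff --git".toList) = ['d', 'i', 'f', 'f', ' ', '-', '-', 'g', 'i', 't'] from rfl] at hl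
  · -- header line: a new group begins
    have hB : pvBGroupStep gs line = gs ++ [[line]] := by
      simp [pvBGroupStep, PySem.Str.startswith_eq, hl]
    cases hgs : gs.getLast? with
    | none =>
        have hgse : gs = [] := List.getLast?_eq_none_iff.1 hgs
        subst hgse
        have hcure : cur = [] := by simp [hcur]
        have hA : pvAStep (res, cur, flag) line = (res, [line], false) := by
          simp [pvAStep, PySem.Str.startswith_eq, hl, hcure]
        rw [hA, hB]
        refine ⟨?_, ?_, ?_, ?_⟩
        · intro g hg
          simp only [List.nil_append, List.mem_singleton] at hg
          exact ⟨line, [], by simp [hg], by simpa using hl⟩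
        · simpa using hres
        · simp [pvRenderCur, pvSinceAt]
        · simp [pvSinceAt]
    | some g0 =>
        have hne : gs ≠ [] := by intro h; subst h; simp at hgs
        obtain ⟨h0, t0, hg0, hh0⟩ := hgood g0 (List.mem_of_getLast? hgs)
        have hcne : cur ≠ [] := by simp [hcur, hgs, pvRenderCur]
        have hgsplit : gs.dropLast ++ [g0] = gs := by
          have := List.dropLast_concat_getLast hne
          rwa [List.getLast_eq_iff_getLast?_eq_some hne |>.2 hgs] at this
        have hA : pvAStep (res, cur, flag) line = (res ++ [PySem.Str.join "\n" cur], [line], false) := by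
          simp [pvAStep, PySem.Str.startswith_eq, hl, hcne]
        rw [hA, hB]
        refine ⟨?_, ?_, ?_, ?_⟩
        · intro g hg
          rcases List.mem_append.1 hg with hg | hg
          · exact hgood g hg
          · exact ⟨line, [], by simpa using hg, by simpa using hl⟩
        · rw [List.dropLast_concat, hres, hcur, hgs]
          simp only [Option.map_some, Option.getD_some]
          conv_rhs => rw [← hgsplit]
          simp [pvF]
        · simp [pvRenderCur, pvSinceAt]
        · simp [pvSinceAt]
  · -- non-header line
    cases hgs : gs.getLast? with
    | none =>
        have hgse : gs = [] := List.getLast?_eq_none_iff.1 hgs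
        subst hgse
        have hcure : cur = [] := by simp [hcur]
        have hA : pvAStep (res, cur, flag) line = (res, cur, flag) := by
          simp [pvAStep, PySem.Str.startswith_eq, hl, hcure]
        have hB : pvBGroupStep [] line = [] := by
          simp [pvBGroupStep, PySem.Str.startswith_eq, hl]
        rw [hA, hB]
        exact ⟨hgood, hres, hcur, hflag⟩
    | some g0 =>
        have hne : gs ≠ [] := by intro h; subst h; simp at hgs
        obtain ⟨h0, t0, hg0, hh0⟩ := hgood g0 (List.mem_of_getLast? hgs)
        have hcne : cur ≠ [] := by simp [hcur, hgs, pvRenderCur]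
        have hgsplit : gs.dropLast ++ [g0] = gs := by
          have := List.dropLast_concat_getLast hne
          rwa [List.getLast_eq_iff_getLast?_eq_some hne |>.2 hgs] at this
        have hB : pvBGroupStep gs line = gs.dropLast ++ [g0 ++ [line]] := by
          simp [pvBGroupStep, PySem.Str.startswith_eq, hl, hne, hgs]
        have hgoodB : ∀ g ∈ pvBGroupStep gs line,
            ∃ h t, g = h :: t ∧ PySem.Str.startswith h "diff --git" = true := by
          intro g hg
          rw [hB] at hg
          rcases List.mem_append.1 hg with hg | hg
          · exact hgood g (by rw [← hgsplit]; exact List.mem_append.2 (Or.inl hg))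
          · simp only [List.mem_singleton] at hg
            exact ⟨h0, t0 ++ [line], by simp [hg, hg0], hh0⟩
        have hdropB : (pvBGroupStep gs line).dropLast = gs.dropLast := by
          rw [hB]; exact List.dropLast_concat ..
        have hlastB : (pvBGroupStep gs line).getLast? = some (g0 ++ [line]) := by
          rw [hB]; exact List.getLast?_concat ..
        have htail : (g0 ++ [line]).tail = t0 ++ [line] := by simp [hg0]
        have hsince := pvSinceAt_append_singleton t0 line
        by_cases hat : PySem.Str.startswith line "@@" = true
        all_goals rw [PySem.Str.startswith_eq,
          show ("@@".toList) = ['@', '@'] from rfl] at hat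
        · -- '@@' line: appended, flag becomes true
          have hA : pvAStep (res, cur, flag) line = (res, cur ++ [line], true) := by
            simp [pvAStep, PySem.Str.startswith_eq, hl, hcne, hat]
          rw [hA]
          refine ⟨hgoodB, by rw [hdropB]; exact hres, ?_, ?_⟩
          · rw [hlastB]
            simp only [Option.map_some, Option.getD_some, pvRenderCur, htail, hsince]
            rw [PySem.Str.startswith_eq, show ("@@".toList) = ['@', '@'] from rfl, if_pos hat]
            by_cases he : (pvSinceAt t0).isEmpty
            · have h0e : pvSinceAt t0 = [] := List.isEmpty_iff.1 he
              simp [hcur, hgs, pvRenderCur, hg0, h0e]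
            · simp [hcur, hgs, pvRenderCur, hg0, he]
          · rw [hlastB]
            simp only [Option.map_some, Option.getD_some, htail, hsince]
            rw [PySem.Str.startswith_eq, show ("@@".toList) = ['@', '@'] from rfl, if_pos hat]
            by_cases he : (pvSinceAt t0).isEmpty <;> simp [he]
        · by_cases hfl : flag = true
          · -- flag already set: line appended
            have hse : ¬ (pvSinceAt t0).isEmpty := by
              rw [hflag, hgs] at hfl; simpa [hg0] using hfl
            have hA : pvAStep (res, cur, flag) line = (res, cur ++ [line], flag) := by
              simp [pvAStep, PySem.Str.startswith_eq, hl, hcne, hat, hfl]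
            rw [hA]
            refine ⟨hgoodB, by rw [hdropB]; exact hres, ?_, ?_⟩
            · rw [hlastB]
              simp only [Option.map_some, Option.getD_some, pvRenderCur, htail, hsince,
                if_neg hse]
              simp [hcur, hgs, pvRenderCur, hg0]
            · rw [hlastB]
              simp only [Option.map_some, Option.getD_some, htail, hsince, if_neg hse]
              simp [hfl]
          · -- before the first '@@': line dropped
            have hse : (pvSinceAt t0).isEmpty := by
              rw [hflag, hgs] at hfl; simpa [hg0] using hfl
            have hA : pvAStep (res, cur, flag) line = (res, cur, flag) := by
              simp [pvAStep, PySem.Str.startswith_eq, hl, hcne, hat, hfl]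
            rw [hA]
            refine ⟨hgoodB, by rw [hdropB]; exact hres, ?_, ?_⟩
            · rw [hlastB]
              simp only [Option.map_some, Option.getD_some, pvRenderCur, htail, hsince,
                if_pos hse]
              rw [PySem.Str.startswith_eq, show ("@@".toList) = ['@', '@'] from rfl,
                if_neg hat]
              have h0e : pvSinceAt t0 = [] := List.isEmpty_iff.1 hse
              simp [hcur, hgs, pvRenderCur, hg0, h0e]
            · rw [hlastB]
              simp only [Option.map_some, Option.getD_some, htail, hsince, if_pos hse]
              rw [PySem.Str.startswith_eq, show ("@@".toList) = ['@', '@'] from rfl,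
                if_neg hat]
              simp [hflag, hgs, hg0, List.isEmpty_iff.1 hse]

lemma pvInv_foldl (lines : List String) :
    ∀ gs st, pvInv gs st →
      pvInv (lines.foldl pvBGroupStep gs) (lines.foldl pvAStep st) := by
  induction lines with
  | nil => intro gs st h; exact h
  | cons l rest ih =>
      intro gs st h
      obtain ⟨res, cur, flag⟩ := st
      exact ih _ _ (pvInv_step gs res cur flag l h)

-- ===== VERDICT (by name: the statement is the Claim_ definition above) =====
theorem format_git_show_minimal_spec : Claim_equal_format_git_show_minimal := by
  intro s _
  unfold Spec_format_git_show_minimal format_git_show_minimal format_git_show_minimal_alt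
  have hinv := pvInv_foldl (PySem.Str.splitlines s) [] ([], [], false)
    ⟨by simp, by simp, by simp, by simp⟩
  set gs := (PySem.Str.splitlines s).foldl pvBGroupStep [] with hgsdef
  set st := (PySem.Str.splitlines s).foldl pvAStep ([], [], false) with hstdef
  obtain ⟨hgood, hres, hcur, hflag⟩ := hinv
  -- the final piece lists coincide
  have hpieces : (if st.2.1 ≠ [] then st.1 ++ [PySem.Str.join "\n" st.2.1] else st.1)
      = gs.map pvBRender := by
    have hmap : gs.map pvBRender = gs.map pvF := by
      apply List.map_congr_left
      intro g hg
      obtain ⟨h, t, hgt, hh⟩ := hgood g hg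
      rw [hgt]; exact pvBRender_eq_f h t hh
    rw [hmap]
    cases hgs : gs.getLast? with
    | none =>
        have : gs = [] := List.getLast?_eq_none_iff.1 hgs
        rw [this]
        have hcure : st.2.1 = [] := by simp [hcur, hgs]
        simp [hcure, hres, this]
    | some g0 =>
        have hne : gs ≠ [] := by intro h; rw [h] at hgs; simp at hgs
        have hcne : st.2.1 ≠ [] := by
          obtain ⟨h, t, hgt, _⟩ := hgood g0 (List.mem_of_getLast? hgs)
          simp [hcur, hgs, pvRenderCur]
        rw [if_pos hcne, hres, hcur, hgs]
        have hgsplit : gs.dropLast ++ [g0] = gs := by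
          have := List.dropLast_concat_getLast hne
          rwa [List.getLast_eq_iff_getLast?_eq_some hne |>.2 hgs] at this
        conv_rhs => rw [← hgsplit]
        simp [pvF]
  show PySem.Str.strip (PySem.Str.join "\n"
      (if st.2.1 ≠ [] then st.1 ++ [PySem.Str.join "\n" st.2.1] else st.1))
    = PySem.Str.strip (PySem.Str.join "\n" (gs.map pvBRender))
  rw [hpieces]
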